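-- pv_equiv track=rewrite | github.com/thulasiramk-2310/TRX-AI | analyzer.py | parse_section_items
-- ===== SOURCE A (Python) =====
-- def parse_section_items(text: str, section_header: str) -> list[str]:
--     lines = [line.strip() for line in text.splitlines() if line.strip()]
--     in_section = False
--     items: list[str] = []
--
--     for line in lines:
--         if line == section_header:
--             in_section = True
--             continue
--         if line.startswith("[") and line.endswith("]") and in_section:
--             break
--         if not in_section:
--             continue
--
--         item = line[1:].strip() if line.startswith("-") else line.strip()
--         if item:
--             items.append(item)
--
--     if items:
--         return items
--
--     fallback = [line for line in lines if not (line.startswith("[") and line.endswith("]"))]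
--     cleaned = []
--     for line in fallback:
--         item = line[1:].strip() if line.startswith("-") else line
--         if item:
--             cleaned.append(item)
--     return cleaned[:6]
-- ===== SOURCE B (Python) =====
-- def parse_section_items(text: str, section_header: str) -> list[str]:
--     # Single backward pass: scanning the cleaned lines right-to-left, maintain
--     #   sec_rev     - the section items (reversed) that would be collected if a
--     #                 section header stood immediately before the current suffix,
--     #   found       - the items of the first header occurrence seen so far,
--     #   cleaned_rev - the fallback candidates (reversed).
--     lines = [l for l in map(str.strip, text.splitlines()) if l]
--     sec_rev: list[str] = []
--     found = None
--     cleaned_rev: list[str] = []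
--     for line in reversed(lines):
--         bracketed = line.startswith("[") and line.endswith("]")
--         item = line[1:].strip() if line.startswith("-") else line
--         if line == section_header:
--             found = sec_rev[::-1]
--         elif bracketed:
--             sec_rev = []
--         elif item:
--             sec_rev.append(item)
--         if not bracketed and item:
--             cleaned_rev.append(item)
--     return found if found else list(reversed(cleaned_rev))[:6]
-- ===== Notes on version B (the rewrite author's own statement) =====
-- stated objective: alternative
-- what changed: Replaces A's forward scan with an in_section flag plus a separate second fallback pass by a single backward traversal of the cleaned lines that maintains three suffix accumulators (section items assuming a header just before the suffix, the first header's result, and the fallback candidates), then selects the answer at the end.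
import Mathlib
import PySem

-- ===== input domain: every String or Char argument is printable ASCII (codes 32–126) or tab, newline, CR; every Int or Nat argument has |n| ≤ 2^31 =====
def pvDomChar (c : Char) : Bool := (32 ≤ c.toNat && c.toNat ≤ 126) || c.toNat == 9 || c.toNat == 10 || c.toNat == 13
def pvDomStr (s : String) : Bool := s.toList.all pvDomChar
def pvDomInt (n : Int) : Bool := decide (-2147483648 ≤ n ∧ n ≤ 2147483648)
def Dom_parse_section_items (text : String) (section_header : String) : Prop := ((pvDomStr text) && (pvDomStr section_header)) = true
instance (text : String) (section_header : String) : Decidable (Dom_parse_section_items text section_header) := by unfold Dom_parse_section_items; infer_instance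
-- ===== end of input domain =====

-- B replaces A's forward flag-scan plus a separate fallback pass by ONE backward pass
-- over the cleaned lines with three suffix accumulators; same cost (alternative).

-- ===== PORT A =====
-- A's for-loop: state = (in_section, items); returning items early is the 'break'
def pvALoop (header : String) : List String → Bool → List String → List String
  | [], _, items => items
  | l :: rest, inSec, items =>
    if l = header then pvALoop header rest true items
    else if PySem.Str.startswith l "[" && PySem.Str.endswith l "]" && inSec then items
    else if !inSec then pvALoop header rest inSec items
    else
      let item := if PySem.Str.startswith l "-" then PySem.Str.strip (PySem.Str.slice l (some 1) none) else PySem.Str.strip l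
      if item ≠ "" then pvALoop header rest inSec (items ++ [item]) else pvALoop header rest inSec items

def parse_section_items (text : String) (section_header : String) : List String :=
  let lines := ((PySem.Str.splitlines text).map PySem.Str.strip).filter (fun l => l ≠ "")
  let items := pvALoop section_header lines false []
  if items ≠ [] then items
  else
    let fallback := lines.filter (fun l => !(PySem.Str.startswith l "[" && PySem.Str.endswith l "]"))
    let cleaned := fallback.foldl (fun acc l =>
      let item := if PySem.Str.startswith l "-" then PySem.Str.strip (PySem.Str.slice l (some 1) none) else l
      if item ≠ "" then acc ++ [item] else acc) []
    cleaned.take 6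

-- ===== PORT B =====
-- one iteration of B's backward loop; state = (sec_rev, found, cleaned_rev)
def pvBStep (header : String) (st : List String × Option (List String) × List String) (line : String) :
    List String × Option (List String) × List String :=
  let bracketed := PySem.Str.startswith line "[" && PySem.Str.endswith line "]"
  let item := if PySem.Str.startswith line "-" then PySem.Str.strip (PySem.Str.slice line (some 1) none) else line
  let secRev := st.1
  let found := st.2.1
  let cleanedRev := st.2.2
  let sf : List String × Option (List String) :=
    if line = header then (secRev, some secRev.reverse)
    else if bracketed then ([], found)
    else if item ≠ "" then (secRev ++ [item], found)
    else (secRev, found)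
  let cleanedRev' := if !bracketed && item ≠ "" then cleanedRev ++ [item] else cleanedRev
  (sf.1, sf.2, cleanedRev')

def parse_section_items_alt (text : String) (section_header : String) : List String :=
  let lines := ((PySem.Str.splitlines text).map PySem.Str.strip).filter (fun l => l ≠ "")
  let st := lines.reverse.foldl (pvBStep section_header) ([], none, [])
  match st.2.1 with
  | some f => if f ≠ [] then f else (st.2.2.reverse).take 6
  | none => (st.2.2.reverse).take 6

-- ===== PRECONDITION & SPEC =====
def Spec_parse_section_items (text : String) (section_header : String) (out : List String) : Prop := out = parse_section_items_alt text section_header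
instance (text : String) (section_header : String) (out : List String) : Decidable (Spec_parse_section_items text section_header out) := by unfold Spec_parse_section_items; infer_instance

-- ===== CLAIM (what is proved, stated in full; the proofs are below) =====
def Claim_equal_parse_section_items : Prop := ∀ (text : String) (section_header : String), Dom_parse_section_items text section_header → Spec_parse_section_items text section_header (parse_section_items text section_header)

-- ===== LEMMAS AND PROOFS =====

def pvBracketed (l : String) : Bool := PySem.Str.startswith l "[" && PySem.Str.endswith l "]"

def pvClean (l : String) : String :=
  if PySem.Str.startswith l "-" then PySem.Str.strip (PySem.Str.slice l (some 1) none) else l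

-- a prefix of a dropWhile-fixed list is dropWhile-fixed
lemma pv_dropWhile_prefix_fixed {α : Type} (p : α → Bool) {t u : List α}
    (ht : t.dropWhile p = t) (hu : u <+: t) : u.dropWhile p = u := by
  cases u with
  | nil => rfl
  | cons a u' =>
    obtain ⟨r, hr⟩ := hu
    have ha : p a = false := by
      by_cases hpa : p a = true
      · exfalso
        rw [← hr, List.cons_append] at ht
        simp only [List.dropWhile_cons, hpa, if_true] at ht
        have hlen := List.length_dropWhile_le p (u' ++ r)
        rw [ht] at hlen
        simp only [List.length_cons, List.length_append] at hlen
        omega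
      · simpa using hpa
    exact List.dropWhile_cons_of_neg (by simp [ha])

lemma pv_chars_strip_idem (cs : List Char) :
    PySem.Chars.strip (PySem.Chars.strip cs) = PySem.Chars.strip cs := by
  show PySem.Chars.rstrip (PySem.Chars.lstrip (PySem.Chars.strip cs)) = PySem.Chars.strip cs
  have h1 : PySem.Chars.lstrip (PySem.Chars.strip cs) = PySem.Chars.strip cs := by
    show (PySem.Chars.strip cs).dropWhile PySem.Chars.isspace = PySem.Chars.strip cs
    apply pv_dropWhile_prefix_fixed (t := PySem.Chars.lstrip cs)
    · exact List.dropWhile_idempotent _ _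
    · show List.rdropWhile PySem.Chars.isspace (PySem.Chars.lstrip cs) <+: PySem.Chars.lstrip cs
      exact List.rdropWhile_prefix _ _
  rw [h1]
  show List.rdropWhile PySem.Chars.isspace (List.rdropWhile PySem.Chars.isspace (PySem.Chars.lstrip cs))
      = List.rdropWhile PySem.Chars.isspace (PySem.Chars.lstrip cs)
  exact List.rdropWhile_idempotent _ _

lemma pv_strip_strip (s : String) : PySem.Str.strip (PySem.Str.strip s) = PySem.Str.strip s := by
  simp [PySem.Str.strip, String.toList_ofList, pv_chars_strip_idem]

-- the items A collects once in_section, as a structural recursion (B-side clean)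
def pvSecB (header : String) : List String → List String
  | [] => []
  | l :: rest =>
    if l = header then pvSecB header rest
    else if pvBracketed l then []
    else if pvClean l ≠ "" then pvClean l :: pvSecB header rest else pvSecB header rest

-- result of the first header occurrence, if any
def pvT (header : String) : List String → Option (List String)
  | [] => none
  | l :: rest => if l = header then some (pvSecB header rest) else pvT header rest

lemma pvALoop_in_sec (header : String) (R : List String) (items : List String)
    (hs : ∀ l ∈ R, PySem.Str.strip l = l) :
    pvALoop header R true items = items ++ pvSecB header R := by
  induction R generalizing items with
  | nil => simp [pvALoop, pvSecB]
  | cons l rest ih =>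
    have hsr : ∀ x ∈ rest, PySem.Str.strip x = x := fun x hx => hs x (List.mem_cons_of_mem _ hx)
    have hsl : PySem.Str.strip l = l := hs l List.mem_cons_self
    have IH : ∀ it, pvALoop header rest true it = it ++ pvSecB header rest := fun it => ih it hsr
    by_cases hl : l = header
    · simp [pvALoop, pvSecB, hl, IH]
    · by_cases hb : PySem.Chars.startswith l.toList ['['] = true ∧ PySem.Chars.endswith l.toList [']'] = true
      · simp [pvALoop, pvSecB, pvBracketed, PySem.Str.startswith, PySem.Str.endswith, hl, hb]
      · have hitem : (if PySem.Str.startswith l "-" then PySem.Str.strip (PySem.Str.slice l (some 1) none) else PySem.Str.strip l) = pvClean l := by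
          unfold pvClean; split_ifs with h
          · rfl
          · exact hsl
        rw [pvALoop, pvSecB]
        simp only [hl, if_false]
        simp only [pvBracketed, PySem.Str.startswith, PySem.Str.endswith] at *
        simp only [hitem]
        simp [hb]
        split <;> simp [IH]

lemma pvALoop_eq_pvT (header : String) (L : List String)
    (hs : ∀ l ∈ L, PySem.Str.strip l = l) :
    pvALoop header L false [] = (pvT header L).getD [] := by
  induction L with
  | nil => simp [pvALoop, pvT]
  | cons l rest ih =>
    have hsr : ∀ x ∈ rest, PySem.Str.strip x = x := fun x hx => hs x (List.mem_cons_of_mem _ hx)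
    by_cases hl : l = header
    · rw [pvALoop, if_pos hl, pvALoop_in_sec header rest [] hsr, pvT, if_pos hl]
      simp
    · rw [pvT, if_neg hl, ← ih hsr, pvALoop]
      simp [hl]

-- one unfolded iteration of B's backward loop, in clean form
lemma pvBStep_eq (header l : String) (s : List String) (f : Option (List String)) (c : List String) :
    pvBStep header (s, f, c) l =
      ((if l = header then s else if pvBracketed l then [] else if pvClean l ≠ "" then s ++ [pvClean l] else s),
       (if l = header then some s.reverse else f),
       (if !pvBracketed l && pvClean l ≠ "" then c ++ [pvClean l] else c)) := by
  simp only [pvBStep, pvBracketed, pvClean]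
  split_ifs <;> simp_all

-- the backward fold computes (pvSecB reversed, pvT, fallback candidates reversed)
lemma pvB_fold (header : String) (L : List String) :
    L.reverse.foldl (pvBStep header) ([], none, []) =
      ((pvSecB header L).reverse, pvT header L,
        ((L.filter (fun l => !pvBracketed l && pvClean l ≠ "")).map pvClean).reverse) := by
  rw [List.foldl_reverse]
  induction L with
  | nil => simp [pvSecB, pvT]
  | cons l rest ih =>
    rw [List.foldr_cons, ih, pvBStep_eq]
    refine Prod.ext ?_ (Prod.ext ?_ ?_)
    · simp only [pvSecB]
      split_ifs <;> simp_all
    · simp only [pvT]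
      split_ifs <;> simp_all
    · simp only [List.filter_cons]
      split_ifs <;> simp_all

-- the two fallback computations agree
lemma pv_fallback_eq (L : List String) :
    (L.filter (fun l => !(PySem.Str.startswith l "[" && PySem.Str.endswith l "]"))).foldl
      (fun acc l =>
        let item := if PySem.Str.startswith l "-" then PySem.Str.strip (PySem.Str.slice l (some 1) none) else l
        if item ≠ "" then acc ++ [item] else acc) []
    = (L.filter (fun l => !pvBracketed l && pvClean l ≠ "")).map pvClean := by
  have h1 : (L.filter (fun l => !(PySem.Str.startswith l "[" && PySem.Str.endswith l "]"))).foldl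
      (fun acc l =>
        let item := if PySem.Str.startswith l "-" then PySem.Str.strip (PySem.Str.slice l (some 1) none) else l
        if item ≠ "" then acc ++ [item] else acc) []
      = (L.filter (fun l => !(PySem.Str.startswith l "[" && PySem.Str.endswith l "]"))).foldl
      (fun acc l => if pvClean l ≠ "" then acc ++ [pvClean l] else acc) [] := rfl
  rw [h1, PySem.List.foldl_append_ite (p := fun l => pvClean l ≠ "") (f := pvClean)]
  rw [List.nil_append, List.filter_filter]
  congr 1
  apply List.filter_congr
  intro x _
  simp [pvBracketed, Bool.and_comm]

-- ===== VERDICT (by name: the statement is the Claim_ definition above) =====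
theorem parse_section_items_spec : Claim_equal_parse_section_items := by
  intro text header _
  unfold Spec_parse_section_items parse_section_items parse_section_items_alt
  simp only []
  set lines := ((PySem.Str.splitlines text).map PySem.Str.strip).filter (fun l => l ≠ "") with hlines
  have hs : ∀ l ∈ lines, PySem.Str.strip l = l := by
    intro l hl
    obtain ⟨hm, -⟩ := List.mem_filter.mp hl
    obtain ⟨raw, -, rfl⟩ := List.mem_map.mp hm
    exact pv_strip_strip raw
  rw [pvALoop_eq_pvT header lines hs, pvB_fold header lines, pv_fallback_eq]
  cases ht : pvT header lines with
  | none => simp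
  | some v =>
    by_cases hv : v = []
    · simp [hv]
    · simp [hv]
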